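-- pv_equiv track=rewrite | github.com/Machinelearning1954/B3-BOMBER-A.I-MIND-READING-CAPABILITIES | Create B3 Bomber Image Using AI and Advanced Tech/mind_reader.py | _enhance_interpretation
-- ===== SOURCE A (Python) =====
-- def _enhance_interpretation(text: str) -> str:
--     """Enhance text interpretation with context and meaning."""
--     # Add context-aware interpretation
--     enhanced_text = text
--
--     # Correct common neural decoding errors
--     corrections = {
--         'teh': 'the',
--         'adn': 'and',
--         'taht': 'that',
--         'woudl': 'would'
--     }
--
--     for error, correction in corrections.items():
--         enhanced_text = enhanced_text.replace(error, correction)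
--
--     return enhanced_text
-- ===== SOURCE B (Python) =====
-- def _enhance_interpretation(text: str) -> str:
--     """Enhance text interpretation with context and meaning."""
--     corrections = {
--         'teh': 'the',
--         'adn': 'and',
--         'taht': 'that',
--         'woudl': 'would'
--     }
--     out = []
--     i = 0
--     n = len(text)
--     while i < n:
--         for error in ('teh', 'adn', 'taht', 'woudl'):
--             if text.startswith(error, i):
--                 out.append(corrections[error])
--                 i += len(error)
--                 break
--         else:
--             out.append(text[i])
--             i += 1
--     return ''.join(out)
-- ===== Notes on version B (the rewrite author's own statement) =====
-- stated objective: alternative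
-- what changed: B replaces the four known typos in one left-to-right scan of the text (trying the patterns in dict order at each position) instead of A's four separate full-text replace passes.
-- outside the precondition, e.g. on _enhance_interpretation('tahteh'): A returns 'thathe', B returns 'thateh'
import Mathlib
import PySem

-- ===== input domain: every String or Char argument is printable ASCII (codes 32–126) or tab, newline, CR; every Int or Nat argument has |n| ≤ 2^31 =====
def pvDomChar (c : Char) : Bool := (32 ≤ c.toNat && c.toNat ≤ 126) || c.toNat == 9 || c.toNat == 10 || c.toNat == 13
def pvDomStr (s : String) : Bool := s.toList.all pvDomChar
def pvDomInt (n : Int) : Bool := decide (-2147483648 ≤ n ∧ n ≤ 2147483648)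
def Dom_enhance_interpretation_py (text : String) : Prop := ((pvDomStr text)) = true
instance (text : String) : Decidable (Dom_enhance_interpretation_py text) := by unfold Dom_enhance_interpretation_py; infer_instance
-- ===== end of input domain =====

-- B replaces the four known typos in ONE left-to-right scan (patterns tried in dict order at each
-- position) instead of A's four sequential full-text replace passes; equal on every text not
-- containing "tahteh" (Pre_), where A's passes interact.

-- ===== PORT A =====
-- the literal corrections dict, as an association list in insertion order
def pvCorrections : List (String × String) :=
  [("teh", "the"), ("adn", "and"), ("taht", "that"), ("woudl", "would")]

def enhance_interpretation_py (text : String) : String :=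
  -- for error, correction in corrections.items(): enhanced_text = enhanced_text.replace(error, correction)
  pvCorrections.foldl (fun acc p => PySem.Str.replace acc p.1 p.2) text

-- ===== PORT B =====
-- Source B's single scan: at each position try the four typos in order (the startswith loop),
-- emit the correction and skip the typo, else copy one character
def pvScanB : List Char → List Char
  | [] => []
  | c :: t =>
    if ['t','e','h'].isPrefixOf (c :: t) then 't' :: 'h' :: 'e' :: pvScanB (t.drop 2)
    else if ['a','d','n'].isPrefixOf (c :: t) then 'a' :: 'n' :: 'd' :: pvScanB (t.drop 2)
    else if ['t','a','h','t'].isPrefixOf (c :: t) then 't' :: 'h' :: 'a' :: 't' :: pvScanB (t.drop 3)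
    else if ['w','o','u','d','l'].isPrefixOf (c :: t) then 'w' :: 'o' :: 'u' :: 'l' :: 'd' :: pvScanB (t.drop 4)
    else c :: pvScanB t
termination_by s => s.length
decreasing_by all_goals simp [List.length_drop]

def enhance_interpretation_py_alt (text : String) : String :=
  String.ofList (pvScanB text.toList)

-- ===== PRECONDITION & SPEC =====
-- Pre_ excludes texts containing "tahteh": there the four sequential passes cascade ("teh"→"the"
-- creates a new "taht" that the later pass also rewrites), an accidental interaction on which
-- A's multi-pass value and B's single-pass value are both defensible.
def Pre_enhance_interpretation_py (text : String) : Prop :=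
  PySem.Str.isIn "tahteh" text = false
instance (text : String) : Decidable (Pre_enhance_interpretation_py text) := by
  unfold Pre_enhance_interpretation_py; infer_instance

def pvWitness_enhance_interpretation_py : String := "i taht woudl teh adn"

def Spec_enhance_interpretation_py (text : String) (out : String) : Prop := out = enhance_interpretation_py_alt text
instance (text : String) (out : String) : Decidable (Spec_enhance_interpretation_py text out) := by unfold Spec_enhance_interpretation_py; infer_instance

-- ===== CLAIM (what is proved, stated in full; the proofs are below) =====
def Claim_equal_enhance_interpretation_py : Prop := ∀ (text : String), Dom_enhance_interpretation_py text → Pre_enhance_interpretation_py text → Spec_enhance_interpretation_py text (enhance_interpretation_py text)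

-- ===== LEMMAS AND PROOFS =====

-- a single replace pass, as a clean structural scanner (pattern split head/tail so the
-- recursion is on the text only); proved equal to PySem.Chars.replace below
def pvRep (o0 : Char) (os new : List Char) : List Char → List Char
  | [] => []
  | c :: t =>
    if (o0 :: os).isPrefixOf (c :: t) then new ++ pvRep o0 os new (t.drop os.length)
    else c :: pvRep o0 os new t
termination_by s => s.length
decreasing_by all_goals simp [List.length_drop]

theorem pvGo_eq (o0 : Char) (os new : List Char) :
    ∀ (fuel : Nat) (l acc : List Char), l.length ≤ fuel →
      PySem.Chars.replace.go (o0 :: os) new fuel l acc = acc.reverse ++ pvRep o0 os new l := by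
  intro fuel
  induction fuel with
  | zero =>
    intro l acc hl
    have : l = [] := List.eq_nil_of_length_eq_zero (Nat.le_zero.mp hl)
    subst this
    simp [PySem.Chars.replace.go, pvRep]
  | succ n ih =>
    intro l acc hl
    cases l with
    | nil => simp [PySem.Chars.replace.go, pvRep]
    | cons c t =>
      rw [PySem.Chars.replace.go]
      by_cases hp : (o0 :: os).isPrefixOf (c :: t) = true
      · simp only [hp, if_true]
        rw [ih, pvRep]
        · simp [hp]
        · simp at hl ⊢
          have := List.length_drop (l := t) (i := os.length)
          omega
      · rw [if_neg hp, ih _ _ (by simp at hl ⊢; omega), pvRep]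
        simp [hp]

theorem pvReplace_eq (o0 : Char) (os new : List Char) (s : List Char) :
    PySem.Chars.replace s (o0 :: os) new = pvRep o0 os new s := by
  rw [PySem.Chars.replace]
  simp [pvGo_eq o0 os new s.length s [] (le_refl _)]

-- the four passes of A
def pvR1 : List Char → List Char := pvRep 't' ['e','h'] ['t','h','e']
def pvR2 : List Char → List Char := pvRep 'a' ['d','n'] ['a','n','d']
def pvR3 : List Char → List Char := pvRep 't' ['a','h','t'] ['t','h','a','t']
def pvR4 : List Char → List Char := pvRep 'w' ['o','u','d','l'] ['w','o','u','l','d']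

theorem pvRep_nil (o0 : Char) (os new : List Char) : pvRep o0 os new [] = [] := by
  simp [pvRep]

theorem pvRep_pos (o0 : Char) (os new : List Char) (c : Char) (t : List Char)
    (h : (o0 :: os).isPrefixOf (c :: t) = true) :
    pvRep o0 os new (c :: t) = new ++ pvRep o0 os new (t.drop os.length) := by
  rw [pvRep]; simp [h]

theorem pvRep_neg (o0 : Char) (os new : List Char) (c : Char) (t : List Char)
    (h : (o0 :: os).isPrefixOf (c :: t) = false) :
    pvRep o0 os new (c :: t) = c :: pvRep o0 os new t := by
  rw [pvRep]; simp [h]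

theorem pvRep_pass (o0 : Char) (os new : List Char) (c : Char) (t : List Char)
    (h : c ≠ o0) : pvRep o0 os new (c :: t) = c :: pvRep o0 os new t := by
  apply pvRep_neg
  simp [List.isPrefixOf]
  intro h'; exact absurd h'.symm h

theorem pvRep_head? (o0 : Char) (os new : List Char) (h : new.head? = some o0) :
    ∀ s : List Char, (pvRep o0 os new s).head? = s.head? := by
  intro s
  cases s with
  | nil => simp [pvRep]
  | cons c t =>
    rw [pvRep]
    by_cases hp : (o0 :: os).isPrefixOf (c :: t) = true
    · have hc : o0 = c := by
        have := (List.isPrefixOf_iff_prefix).mp hp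
        exact (List.cons_prefix_cons.mp this).1
      cases new with
      | nil => simp at h
      | cons n0 ns =>
        simp at h
        subst hc; subst h
        split <;> simp
    · simp [hp]

-- specialised step lemmas for the four passes
theorem pvR1_pass (c : Char) (h : c ≠ 't') (t : List Char) : pvR1 (c :: t) = c :: pvR1 t :=
  pvRep_pass _ _ _ _ _ h
theorem pvR2_pass (c : Char) (h : c ≠ 'a') (t : List Char) : pvR2 (c :: t) = c :: pvR2 t :=
  pvRep_pass _ _ _ _ _ h
theorem pvR3_pass (c : Char) (h : c ≠ 't') (t : List Char) : pvR3 (c :: t) = c :: pvR3 t :=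
  pvRep_pass _ _ _ _ _ h
theorem pvR4_pass (c : Char) (h : c ≠ 'w') (t : List Char) : pvR4 (c :: t) = c :: pvR4 t :=
  pvRep_pass _ _ _ _ _ h

theorem pvR1_teh (r : List Char) : pvR1 ('t'::'e'::'h'::r) = 't'::'h'::'e':: pvR1 r := by
  have := pvRep_pos 't' ['e','h'] ['t','h','e'] 't' ('e'::'h'::r) (by simp [List.isPrefixOf])
  simpa [pvR1] using this

theorem pvR1_t (t : List Char) (h : ['e','h'].isPrefixOf t = false) :
    pvR1 ('t'::t) = 't' :: pvR1 t := by
  apply pvRep_neg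
  simpa [List.isPrefixOf] using h

theorem pvR2_adn (r : List Char) : pvR2 ('a'::'d'::'n'::r) = 'a'::'n'::'d':: pvR2 r := by
  have := pvRep_pos 'a' ['d','n'] ['a','n','d'] 'a' ('d'::'n'::r) (by simp [List.isPrefixOf])
  simpa [pvR2] using this

theorem pvR2_a (t : List Char) (h : ['d','n'].isPrefixOf t = false) :
    pvR2 ('a'::t) = 'a' :: pvR2 t := by
  apply pvRep_neg
  simpa [List.isPrefixOf] using h

theorem pvR3_taht (r : List Char) : pvR3 ('t'::'a'::'h'::'t'::r) = 't'::'h'::'a'::'t':: pvR3 r := by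
  have := pvRep_pos 't' ['a','h','t'] ['t','h','a','t'] 't' ('a'::'h'::'t'::r) (by simp [List.isPrefixOf])
  simpa [pvR3] using this

theorem pvR3_t (t : List Char) (h : ['a','h','t'].isPrefixOf t = false) :
    pvR3 ('t'::t) = 't' :: pvR3 t := by
  apply pvRep_neg
  simpa [List.isPrefixOf] using h

theorem pvR4_woudl (r : List Char) : pvR4 ('w'::'o'::'u'::'d'::'l'::r) = 'w'::'o'::'u'::'l'::'d':: pvR4 r := by
  have := pvRep_pos 'w' ['o','u','d','l'] ['w','o','u','l','d'] 'w' ('o'::'u'::'d'::'l'::r) (by simp [List.isPrefixOf])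
  simpa [pvR4] using this

theorem pvR4_w (t : List Char) (h : ['o','u','d','l'].isPrefixOf t = false) :
    pvR4 ('w'::t) = 'w' :: pvR4 t := by
  apply pvRep_neg
  simpa [List.isPrefixOf] using h

theorem pvR1_head? (s : List Char) : (pvR1 s).head? = s.head? :=
  pvRep_head? _ _ _ rfl s
theorem pvR2_head? (s : List Char) : (pvR2 s).head? = s.head? :=
  pvRep_head? _ _ _ rfl s
theorem pvR3_head? (s : List Char) : (pvR3 s).head? = s.head? :=
  pvRep_head? _ _ _ rfl s

-- prefix-reflection ("chase") lemmas: a typo pattern visible in the output of the earlier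
-- passes was already present in their input
theorem pvC2 (r : List Char) (h : ['d','n'] <+: pvR1 r) : ['d','n'] <+: r := by
  obtain ⟨u, hu⟩ := h
  simp only [List.cons_append, List.nil_append] at hu
  have hh : r.head? = some 'd' := by rw [← pvR1_head? r, ← hu]; rfl
  cases r with
  | nil => simp at hh
  | cons c r2 =>
    simp at hh; subst hh
    rw [pvR1_pass 'd' (by decide)] at hu
    injection hu with _ hu
    have hh2 : r2.head? = some 'n' := by rw [← pvR1_head? r2, ← hu]; rfl
    cases r2 with
    | nil => simp at hh2
    | cons c2 r3 =>
      simp at hh2; subst hh2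
      exact ⟨r3, rfl⟩

theorem pvC1 (r : List Char) (h : ['a','h','t'] <+: pvR2 (pvR1 r)) : ['a','h','t'] <+: r := by
  obtain ⟨u, hu⟩ := h
  simp only [List.cons_append, List.nil_append] at hu
  have hh : r.head? = some 'a' := by
    rw [← pvR1_head? r, ← pvR2_head? (pvR1 r), ← hu]; rfl
  cases r with
  | nil => simp at hh
  | cons c r2 =>
    simp at hh; subst hh
    rw [pvR1_pass 'a' (by decide)] at hu
    by_cases hp : ['d','n'].isPrefixOf (pvR1 r2) = true
    · -- "adn" matched there: the output continues 'n', not 'h'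
      have hpos := pvRep_pos 'a' ['d','n'] ['a','n','d'] 'a' (pvR1 r2) (by simp [List.isPrefixOf, hp])
      rw [show pvR2 ('a' :: pvR1 r2) = pvRep 'a' ['d','n'] ['a','n','d'] ('a' :: pvR1 r2) from rfl,
        hpos] at hu
      simp only [List.cons_append, List.nil_append] at hu
      injection hu with _ hu
      injection hu with hbad _
      exact absurd hbad (by decide)
    · rw [pvR2_a _ (eq_false_of_ne_true hp)] at hu
      injection hu with _ hu
      have hh2 : r2.head? = some 'h' := by
        rw [← pvR1_head? r2, ← pvR2_head? (pvR1 r2), ← hu]; rfl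
      cases r2 with
      | nil => simp at hh2
      | cons c2 r3 =>
        simp at hh2; subst hh2
        rw [pvR1_pass 'h' (by decide), pvR2_pass 'h' (by decide)] at hu
        injection hu with _ hu
        have hh3 : r3.head? = some 't' := by
          rw [← pvR1_head? r3, ← pvR2_head? (pvR1 r3), ← hu]; rfl
        cases r3 with
        | nil => simp at hh3
        | cons c3 r4 =>
          simp at hh3; subst hh3
          exact ⟨r4, rfl⟩

theorem pvPass123 (c : Char) (h1 : c ≠ 't') (h2 : c ≠ 'a') (t : List Char) :
    pvR3 (pvR2 (pvR1 (c :: t))) = c :: pvR3 (pvR2 (pvR1 t)) := by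
  rw [pvR1_pass c h1, pvR2_pass c h2, pvR3_pass c h1]

theorem pvHead123 (s : List Char) : (pvR3 (pvR2 (pvR1 s))).head? = s.head? := by
  rw [pvR3_head?, pvR2_head?, pvR1_head?]

theorem pvC3 (r : List Char) (h : ['o','u','d','l'] <+: pvR3 (pvR2 (pvR1 r))) :
    ['o','u','d','l'] <+: r := by
  obtain ⟨u, hu⟩ := h
  simp only [List.cons_append, List.nil_append] at hu
  have hh : r.head? = some 'o' := by rw [← pvHead123 r, ← hu]; rfl
  cases r with
  | nil => simp at hh
  | cons c r2 =>
    simp at hh; subst hh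
    rw [pvPass123 'o' (by decide) (by decide)] at hu
    injection hu with _ hu
    have hh2 : r2.head? = some 'u' := by rw [← pvHead123 r2, ← hu]; rfl
    cases r2 with
    | nil => simp at hh2
    | cons c2 r3 =>
      simp at hh2; subst hh2
      rw [pvPass123 'u' (by decide) (by decide)] at hu
      injection hu with _ hu
      have hh3 : r3.head? = some 'd' := by rw [← pvHead123 r3, ← hu]; rfl
      cases r3 with
      | nil => simp at hh3
      | cons c3 r4 =>
        simp at hh3; subst hh3
        rw [pvPass123 'd' (by decide) (by decide)] at hu
        injection hu with _ hu
        have hh4 : r4.head? = some 'l' := by rw [← pvHead123 r4, ← hu]; rfl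
        cases r4 with
        | nil => simp at hh4
        | cons c4 r5 =>
          simp at hh4; subst hh4
          exact ⟨r5, rfl⟩

theorem pvNotInfix_suffix (l l' : List Char) (hs : l' <:+ l)
    (h : ¬ (['t','a','h','t','e','h'] <:+: l)) : ¬ (['t','a','h','t','e','h'] <:+: l') :=
  fun hi => h (hi.trans hs.isInfix)

theorem pvScanB_nil : pvScanB [] = [] := by simp [pvScanB]

theorem pvScanB_teh (u : List Char) :
    pvScanB ('t'::'e'::'h'::u) = 't'::'h'::'e':: pvScanB u := by
  rw [pvScanB]; simp [List.isPrefixOf]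

theorem pvScanB_adn (u : List Char) :
    pvScanB ('a'::'d'::'n'::u) = 'a'::'n'::'d':: pvScanB u := by
  rw [pvScanB]; simp [List.isPrefixOf]

theorem pvScanB_taht (u : List Char) :
    pvScanB ('t'::'a'::'h'::'t'::u) = 't'::'h'::'a'::'t':: pvScanB u := by
  rw [pvScanB]; simp [List.isPrefixOf]

theorem pvScanB_woudl (u : List Char) :
    pvScanB ('w'::'o'::'u'::'d'::'l'::u) = 'w'::'o'::'u'::'l'::'d':: pvScanB u := by
  rw [pvScanB]; simp [List.isPrefixOf]

theorem pvScanB_default (c : Char) (t : List Char)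
    (h1 : ['t','e','h'].isPrefixOf (c :: t) = false)
    (h2 : ['a','d','n'].isPrefixOf (c :: t) = false)
    (h3 : ['t','a','h','t'].isPrefixOf (c :: t) = false)
    (h4 : ['w','o','u','d','l'].isPrefixOf (c :: t) = false) :
    pvScanB (c :: t) = c :: pvScanB t := by
  rw [pvScanB]; simp [h1, h2, h3, h4]

-- the main equivalence on character lists
theorem pvMain : ∀ (n : Nat) (s : List Char), s.length ≤ n →
    ¬ (['t','a','h','t','e','h'] <:+: s) → pvR4 (pvR3 (pvR2 (pvR1 s))) = pvScanB s := by
  intro n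
  induction n with
  | zero =>
    intro s hl _
    have : s = [] := List.eq_nil_of_length_eq_zero (Nat.le_zero.mp hl)
    subst this
    simp [pvR1, pvR2, pvR3, pvR4, pvRep_nil, pvScanB_nil]
  | succ n ih =>
    intro s hl hb
    cases s with
    | nil => simp [pvR1, pvR2, pvR3, pvR4, pvRep_nil, pvScanB_nil]
    | cons c t =>
      by_cases h1 : ['t','e','h'].isPrefixOf (c :: t) = true
      · obtain ⟨u, hu⟩ := List.isPrefixOf_iff_prefix.mp h1
        simp only [List.cons_append, List.nil_append] at hu
        injection hu with hc hu; subst hc; subst hu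
        rw [pvR1_teh, pvR2_pass 't' (by decide), pvR2_pass 'h' (by decide),
            pvR2_pass 'e' (by decide), pvR3_t _ (by simp [List.isPrefixOf]),
            pvR3_pass 'h' (by decide), pvR3_pass 'e' (by decide), pvR4_pass 't' (by decide),
            pvR4_pass 'h' (by decide), pvR4_pass 'e' (by decide), pvScanB_teh]
        rw [ih u (by simp at hl; omega) (pvNotInfix_suffix _ _ ⟨['t','e','h'], rfl⟩ hb)]
      · by_cases h2 : ['a','d','n'].isPrefixOf (c :: t) = true
        · obtain ⟨u, hu⟩ := List.isPrefixOf_iff_prefix.mp h2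
          simp only [List.cons_append, List.nil_append] at hu
          injection hu with hc hu; subst hc; subst hu
          rw [pvR1_pass 'a' (by decide), pvR1_pass 'd' (by decide), pvR1_pass 'n' (by decide),
              pvR2_adn]
          rw [pvR3_pass 'a' (by decide), pvR3_pass 'n' (by decide), pvR3_pass 'd' (by decide),
              pvR4_pass 'a' (by decide), pvR4_pass 'n' (by decide), pvR4_pass 'd' (by decide),
              pvScanB_adn]
          rw [ih u (by simp at hl; omega) (pvNotInfix_suffix _ _ ⟨['a','d','n'], rfl⟩ hb)]
        · by_cases h3 : ['t','a','h','t'].isPrefixOf (c :: t) = true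
          · obtain ⟨u, hu⟩ := List.isPrefixOf_iff_prefix.mp h3
            simp only [List.cons_append, List.nil_append] at hu
            injection hu with hc hu; subst hc; subst hu
            -- Pre_: "tahteh" not in the text, so u does not start with "eh"
            have hne : ['e','h'].isPrefixOf u = false := by
              rw [← Bool.not_eq_true]
              intro hp
              obtain ⟨v, hv⟩ := List.isPrefixOf_iff_prefix.mp hp
              simp only [List.cons_append, List.nil_append] at hv
              apply hb
              refine List.IsPrefix.isInfix ⟨v, ?_⟩
              simp [← hv]
            rw [show pvR1 ('t'::'a'::'h'::'t'::u)
                  = pvRep 't' ['e','h'] ['t','h','e'] ('t'::'a'::'h'::'t'::u) from rfl,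
                pvRep_neg _ _ _ _ _ (by simp [List.isPrefixOf]),
                pvRep_pass _ _ _ 'a' _ (by decide), pvRep_pass _ _ _ 'h' _ (by decide)]
            rw [show pvRep 't' ['e','h'] ['t','h','e'] ('t'::u) = pvR1 ('t'::u) from rfl,
                pvR1_t u hne]
            rw [pvR2_pass 't' (by decide)]
            rw [show pvR2 ('a'::'h'::'t':: pvR1 u)
                  = pvRep 'a' ['d','n'] ['a','n','d'] ('a'::'h'::'t':: pvR1 u) from rfl,
                pvRep_neg _ _ _ _ _ (by simp [List.isPrefixOf]),
                pvRep_pass _ _ _ 'h' _ (by decide), pvRep_pass _ _ _ 't' _ (by decide)]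
            rw [show pvRep 'a' ['d','n'] ['a','n','d'] (pvR1 u) = pvR2 (pvR1 u) from rfl,
                pvR3_taht, pvR4_pass 't' (by decide), pvR4_pass 'h' (by decide),
                pvR4_pass 'a' (by decide), pvR4_pass 't' (by decide), pvScanB_taht]
            rw [ih u (by simp at hl; omega)
               (pvNotInfix_suffix _ _ ⟨['t','a','h','t'], rfl⟩ hb)]
          · by_cases h4 : ['w','o','u','d','l'].isPrefixOf (c :: t) = true
            · obtain ⟨u, hu⟩ := List.isPrefixOf_iff_prefix.mp h4
              simp only [List.cons_append, List.nil_append] at hu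
              injection hu with hc hu; subst hc; subst hu
              rw [pvR1_pass 'w' (by decide), pvR1_pass 'o' (by decide),
                  pvR1_pass 'u' (by decide), pvR1_pass 'd' (by decide),
                  pvR1_pass 'l' (by decide), pvR2_pass 'w' (by decide),
                  pvR2_pass 'o' (by decide), pvR2_pass 'u' (by decide),
                  pvR2_pass 'd' (by decide), pvR2_pass 'l' (by decide),
                  pvR3_pass 'w' (by decide), pvR3_pass 'o' (by decide),
                  pvR3_pass 'u' (by decide), pvR3_pass 'd' (by decide),
                  pvR3_pass 'l' (by decide), pvR4_woudl, pvScanB_woudl]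
              rw [ih u (by simp at hl; omega)
                 (pvNotInfix_suffix _ _ ⟨['w','o','u','d','l'], rfl⟩ hb)]
            · -- no typo starts at this position
              have hrec := ih t (by simp at hl; omega)
                (pvNotInfix_suffix _ _ (List.suffix_cons c t) hb)
              have hscan := pvScanB_default c t (eq_false_of_ne_true h1)
                (eq_false_of_ne_true h2) (eq_false_of_ne_true h3) (eq_false_of_ne_true h4)
              by_cases ct : c = 't'
              · subst ct
                have hA : ['e','h'].isPrefixOf t = false := by
                  have := eq_false_of_ne_true h1
                  simpa [List.isPrefixOf] using this
                have hB : ¬ (['a','h','t'] <+: t) := by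
                  intro hp
                  exact h3 (by
                    rw [List.isPrefixOf_iff_prefix, List.cons_prefix_cons]
                    exact ⟨rfl, hp⟩)
                have hC : ['a','h','t'].isPrefixOf (pvR2 (pvR1 t)) = false := by
                  rw [← Bool.not_eq_true]
                  intro hp
                  exact hB (pvC1 t (List.isPrefixOf_iff_prefix.mp hp))
                rw [pvR1_t t hA, pvR2_pass 't' (by decide), pvR3_t _ hC,
                    pvR4_pass 't' (by decide), hscan]
                congr 1
              · by_cases ca : c = 'a'
                · subst ca
                  have hB : ¬ (['d','n'] <+: t) := by
                    intro hp
                    exact h2 (by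
                      rw [List.isPrefixOf_iff_prefix, List.cons_prefix_cons]
                      exact ⟨rfl, hp⟩)
                  have hC : ['d','n'].isPrefixOf (pvR1 t) = false := by
                    rw [← Bool.not_eq_true]
                    intro hp
                    exact hB (pvC2 t (List.isPrefixOf_iff_prefix.mp hp))
                  rw [pvR1_pass 'a' (by decide), pvR2_a _ hC, pvR3_pass 'a' (by decide),
                      pvR4_pass 'a' (by decide), hscan]
                  congr 1
                · by_cases cw : c = 'w'
                  · subst cw
                    have hB : ¬ (['o','u','d','l'] <+: t) := by
                      intro hp
                      exact h4 (by
                        rw [List.isPrefixOf_iff_prefix, List.cons_prefix_cons]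
                        exact ⟨rfl, hp⟩)
                    have hC : ['o','u','d','l'].isPrefixOf (pvR3 (pvR2 (pvR1 t))) = false := by
                      rw [← Bool.not_eq_true]
                      intro hp
                      exact hB (pvC3 t (List.isPrefixOf_iff_prefix.mp hp))
                    rw [pvR1_pass 'w' (by decide), pvR2_pass 'w' (by decide),
                        pvR3_pass 'w' (by decide), pvR4_w _ hC, hscan]
                    congr 1
                  · rw [pvR1_pass c ct, pvR2_pass c ca, pvR3_pass c ct, pvR4_pass c cw, hscan]
                    congr 1

-- ===== VERDICT (by name: the statement is the Claim_ definition above) =====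
theorem enhance_interpretation_py_spec : Claim_equal_enhance_interpretation_py := by
  intro text _ hpre
  unfold Spec_enhance_interpretation_py enhance_interpretation_py enhance_interpretation_py_alt pvCorrections
  have hnb : ¬ (['t','a','h','t','e','h'] <:+: text.toList) := by
    apply (PySem.Chars.isIn_eq_false_iff _ _).mp
    simpa using hpre
  have key := pvMain text.toList.length text.toList le_rfl hnb
  simp only [List.foldl, PySem.Str.replace, String.toList_ofList]
  rw [show ("teh" : String).toList = ['t','e','h'] from rfl,
      show ("the" : String).toList = ['t','h','e'] from rfl,
      show ("adn" : String).toList = ['a','d','n'] from rfl,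
      show ("and" : String).toList = ['a','n','d'] from rfl,
      show ("taht" : String).toList = ['t','a','h','t'] from rfl,
      show ("that" : String).toList = ['t','h','a','t'] from rfl,
      show ("woudl" : String).toList = ['w','o','u','d','l'] from rfl,
      show ("would" : String).toList = ['w','o','u','l','d'] from rfl,
      pvReplace_eq, pvReplace_eq, pvReplace_eq, pvReplace_eq]
  rw [show pvRep 't' ['e','h'] ['t','h','e'] text.toList = pvR1 text.toList from rfl]
  rw [show pvRep 'a' ['d','n'] ['a','n','d'] (pvR1 text.toList) = pvR2 (pvR1 text.toList) from rfl]
  rw [show pvRep 't' ['a','h','t'] ['t','h','a','t'] (pvR2 (pvR1 text.toList))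
        = pvR3 (pvR2 (pvR1 text.toList)) from rfl]
  rw [show pvRep 'w' ['o','u','d','l'] ['w','o','u','l','d'] (pvR3 (pvR2 (pvR1 text.toList)))
        = pvR4 (pvR3 (pvR2 (pvR1 text.toList))) from rfl]
  rw [key]
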